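-- pv_equiv track=rewrite | github.com/edson-gonzales/sudoku2015-a | src/utils/data_converter.py | validate_txt_lines
-- ===== SOURCE A (Python) =====
-- def validate_txt_lines(txt_content):
--     """
--     Returns True if the lines have the proper format to be handled by the program
--     otherwise it returns False
--     Keyword arguments:
--     txt_content -- the txt file content as a string, it should have 81 characters separated
--     by a new line character every 9 characters (i.e. 200080300\n060070084\n030500209...)
--     """
--     result = True
--     txt_lines = txt_content.split('\n')
--
--     for line in txt_lines:
--         if len(line) != 9:
--             result = False
--     if len(txt_lines) != 9:
--         result = False
--     return result
-- ===== SOURCE B (Python) =====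
-- def validate_txt_lines(txt_content):
--     """Anchored template match: consume 9 non-newline chars, then 8 groups of
--     '\n' followed by 9 non-newline chars, and require the string to end there.
--     No splitting, no scan of the whole input past the first mismatch."""
--     def chunk(s):
--         # strip exactly 9 non-newline chars off the front, or None on mismatch
--         head, rest = s[:9], s[9:]
--         return rest if len(head) == 9 and '\n' not in head else None
--
--     def match(s, groups):
--         if s is None:
--             return False
--         if groups == 0:
--             return s == ''
--         return s.startswith('\n') and match(chunk(s[1:]), groups - 1)
--
--     return match(chunk(txt_content), 8)
-- ===== Notes on version B (the rewrite author's own statement) =====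
-- stated objective: alternative
-- what changed: B replaces A's split-the-whole-string-into-lines-then-check-each-line pass by an anchored template match that consumes 9 non-newline chars and then 8 groups of newline-plus-9, stopping at the first mismatch (so it inspects at most the first 90 characters).
import Mathlib
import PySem

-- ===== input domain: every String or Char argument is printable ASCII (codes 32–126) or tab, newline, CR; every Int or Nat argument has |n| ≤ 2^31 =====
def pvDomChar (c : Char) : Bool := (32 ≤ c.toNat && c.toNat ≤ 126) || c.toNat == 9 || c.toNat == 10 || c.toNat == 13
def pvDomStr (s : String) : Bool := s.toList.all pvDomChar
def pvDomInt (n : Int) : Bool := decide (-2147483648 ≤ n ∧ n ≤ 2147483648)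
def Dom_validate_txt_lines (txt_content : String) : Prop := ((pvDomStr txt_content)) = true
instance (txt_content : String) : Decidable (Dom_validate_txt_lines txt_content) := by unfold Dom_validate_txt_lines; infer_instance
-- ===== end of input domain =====

-- B replaces A's split-into-lines-then-check-every-line pass by an anchored template match
-- that inspects at most the first 90 characters (objective: alternative algorithm).

-- ===== PORT A =====
def validate_txt_lines (txt_content : String) : Bool :=
  -- result = True; txt_lines = txt_content.split('\n')
  let txt_lines := PySem.Chars.splitOn txt_content.toList ['\n']
  -- for line in txt_lines: if len(line) != 9: result = False
  let result := txt_lines.foldl (fun result line => if line.length ≠ 9 then false else result) true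
  -- if len(txt_lines) != 9: result = False
  let result := if txt_lines.length ≠ 9 then false else result
  result

-- ===== PORT B =====
-- chunk(s): head, rest = s[:9], s[9:]; rest if len(head) == 9 and '\n' not in head else None
def pvChunk (s : List Char) : Option (List Char) :=
  let head := PySem.List.slice s none (some 9)
  let rest := PySem.List.slice s (some 9) none
  if head.length = 9 ∧ ¬ PySem.Chars.isIn ['\n'] head then some rest else none

-- match(s, groups): recursion of Source B, step for step
def pvMatch : Option (List Char) → Nat → Bool
  | none, _ => false
  | some s, 0 => s.isEmpty                     -- s == ''
  | some s, g + 1 =>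
      PySem.Chars.startswith s ['\n'] && pvMatch (pvChunk (PySem.List.slice s (some 1) none)) g

def validate_txt_lines_alt (txt_content : String) : Bool :=
  pvMatch (pvChunk txt_content.toList) 8

-- ===== PRECONDITION & SPEC =====
def Spec_validate_txt_lines (txt_content : String) (out : Bool) : Prop := out = validate_txt_lines_alt txt_content
instance (txt_content : String) (out : Bool) : Decidable (Spec_validate_txt_lines txt_content out) := by unfold Spec_validate_txt_lines; infer_instance

-- ===== CLAIM (what is proved, stated in full; the proofs are below) =====
def Claim_equal_validate_txt_lines : Prop := ∀ (txt_content : String), Dom_validate_txt_lines txt_content → Spec_validate_txt_lines txt_content (validate_txt_lines txt_content)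

-- ===== LEMMAS AND PROOFS =====

-- reference form of str.split('\n') used only in the proofs
def splitNL (pre : List Char) : List Char → List (List Char)
  | [] => [pre]
  | c :: r => if c = '\n' then pre :: splitNL [] r else splitNL (pre ++ [c]) r

theorem splitNL_ne_nil (pre cs : List Char) : splitNL pre cs ≠ [] := by
  induction cs generalizing pre with
  | nil => simp [splitNL]
  | cons c r ih => simp only [splitNL]; split <;> simp [ih]

theorem splitNL_no_nl (pre cs : List Char) (h : '\n' ∉ cs) : splitNL pre cs = [pre ++ cs] := by
  induction cs generalizing pre with
  | nil => simp [splitNL]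
  | cons c r ih =>
      simp only [List.mem_cons, not_or] at h
      simp [splitNL, Ne.symm h.1, ih _ h.2]

theorem splitNL_append (pre l r : List Char) (h : '\n' ∉ l) :
    splitNL pre (l ++ '\n' :: r) = (pre ++ l) :: splitNL [] r := by
  induction l generalizing pre with
  | nil => simp [splitNL]
  | cons c t ih =>
      simp only [List.mem_cons, not_or] at h
      simp [splitNL, Ne.symm h.1, ih _ h.2]

theorem splitOn_go_eq (fuel : Nat) : ∀ (l cur : List Char) (acc : List (List Char)),
    l.length < fuel →
    PySem.Chars.splitOn.go ['\n'] fuel l cur acc = acc.reverse ++ splitNL cur.reverse l := by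
  induction fuel with
  | zero => intro l cur acc h; omega
  | succ fuel ih =>
      intro l cur acc h
      match l with
      | [] => simp [PySem.Chars.splitOn.go, splitNL]
      | c :: rest =>
          by_cases hc : c = '\n'
          · subst hc
            have hpre : List.isPrefixOf ['\n'] ('\n' :: rest) = true := by
              simp [List.isPrefixOf]
            simp only [PySem.Chars.splitOn.go, hpre, if_true]
            rw [ih _ _ _ (by simpa using Nat.lt_of_succ_lt_succ h)]
            simp [splitNL]
          · have hpre : List.isPrefixOf ['\n'] (c :: rest) = false := by
              simp [List.isPrefixOf]
              intro h'; exact absurd h'.symm hc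
            simp only [PySem.Chars.splitOn.go, hpre,
              splitNL, hc, if_false]
            rw [ih rest (c :: cur) acc (by simpa using Nat.lt_of_succ_lt_succ h)]
            simp

theorem splitOn_eq_splitNL (cs : List Char) :
    PySem.Chars.splitOn cs ['\n'] = splitNL [] cs := by
  simpa using splitOn_go_eq (cs.length + 1) cs [] [] (by omega)

-- A's accumulator loop is an all-check
theorem foldl_res (ls : List (List Char)) (r : Bool) :
    ls.foldl (fun result line => if line.length ≠ 9 then false else result) r
      = (r && ls.all (fun l => l.length == 9)) := by
  induction ls generalizing r with
  | nil => simp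
  | cons l t ih =>
      simp only [List.foldl_cons, List.all_cons, ih]
      by_cases hl : l.length = 9 <;> simp [hl]

-- every string is newline-free or splits at its first newline
theorem exists_decomp (cs : List Char) :
    '\n' ∉ cs ∨ ∃ l r, cs = l ++ '\n' :: r ∧ '\n' ∉ l := by
  induction cs with
  | nil => left; simp
  | cons c t ih =>
      by_cases hc : c = '\n'
      · right; exact ⟨[], t, by simp [hc], by simp⟩
      · cases ih with
        | inl h => left; simp [List.mem_cons, Ne.symm hc, h]
        | inr h =>
            obtain ⟨l, r, he, hn⟩ := h
            right
            exact ⟨c :: l, r, by simp [he], by simp [List.mem_cons, Ne.symm hc, hn]⟩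

theorem slice_to_9 (cs : List Char) : PySem.List.slice cs none (some 9) = cs.take 9 := by
  simp [pysem]

theorem slice_from_9 (cs : List Char) : PySem.List.slice cs (some 9) none = cs.drop 9 := by
  simp [pysem]

theorem chunk_none_of_nl (cs : List Char) (h : '\n' ∈ cs.take 9) : pvChunk cs = none := by
  simp only [pvChunk, slice_to_9, slice_from_9]
  rw [if_neg]
  rintro ⟨-, hno⟩
  exact hno (by rw [PySem.Chars.isIn_iff_infix, List.singleton_infix_iff]; exact h)

theorem chunk_none_of_short (cs : List Char) (h : cs.length < 9) : pvChunk cs = none := by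
  simp only [pvChunk, slice_to_9, slice_from_9]
  rw [if_neg]
  rintro ⟨hlen, -⟩
  rw [List.length_take] at hlen
  omega

theorem chunk_some (cs : List Char) (h9 : 9 ≤ cs.length) (hnl : '\n' ∉ cs.take 9) :
    pvChunk cs = some (cs.drop 9) := by
  simp only [pvChunk, slice_to_9, slice_from_9]
  rw [if_pos]
  exact ⟨by rw [List.length_take]; omega,
    by rw [Bool.not_eq_true, ← Bool.not_eq_true, PySem.Chars.isIn_iff_infix,
      List.singleton_infix_iff]; exact hnl⟩

theorem startswith_nl_cons (r : List Char) : PySem.Chars.startswith ('\n' :: r) ['\n'] = true := by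
  rw [PySem.Chars.startswith_iff]; exact ⟨r, rfl⟩

theorem startswith_nl_false (x : Char) (r : List Char) (hx : x ≠ '\n') :
    PySem.Chars.startswith (x :: r) ['\n'] = false := by
  rw [← Bool.not_eq_true, PySem.Chars.startswith_iff]
  simp [List.cons_prefix_cons, Ne.symm hx]

theorem startswith_nl_false_of_not_mem (s : List Char) (h : '\n' ∉ s) :
    PySem.Chars.startswith s ['\n'] = false := by
  cases s with
  | nil => rw [← Bool.not_eq_true, PySem.Chars.startswith_iff]; simp
  | cons x r =>
      simp only [List.mem_cons, not_or] at h
      exact startswith_nl_false x r (fun hx => h.1 hx.symm)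

-- the anchored matcher agrees with the split-into-lines view, line count g + 1
theorem pvMatch_eq (g : Nat) : ∀ cs : List Char,
    pvMatch (pvChunk cs) g
      = decide ((splitNL [] cs).length = g + 1 ∧ ∀ l ∈ splitNL [] cs, l.length = 9) := by
  induction g with
  | zero =>
      intro cs
      cases exists_decomp cs with
      | inl hno =>
          rw [splitNL_no_nl [] cs hno]
          by_cases hlen : 9 ≤ cs.length
          · rw [chunk_some cs hlen (fun hm => hno (List.take_subset 9 cs hm))]
            by_cases h9 : cs.length = 9
            · have : cs.drop 9 = [] := by rw [List.drop_eq_nil_iff]; omega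
              simp [pvMatch, this, h9]
            · have : cs.drop 9 ≠ [] := by rw [ne_eq, List.drop_eq_nil_iff]; omega
              simp [pvMatch, this, h9]
          · rw [chunk_none_of_short cs (by omega)]
            have : cs.length ≠ 9 := by omega
            simp [pvMatch, this]
      | inr hdec =>
          obtain ⟨l, r, he, hnl⟩ := hdec
          subst he
          rw [splitNL_append [] l r hnl]
          by_cases h9 : l.length < 9
          · have hmem : '\n' ∈ (l ++ '\n' :: r).take 9 := by
              rw [List.take_append]
              refine List.mem_append_right _ ?_
              have : 1 ≤ 9 - l.length := by omega
              cases h : 9 - l.length with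
              | zero => omega
              | succ k => simp
            rw [chunk_none_of_nl _ hmem]
            have : l.length ≠ 9 := by omega
            simp [pvMatch, this]
          · have htake : (l ++ '\n' :: r).take 9 = l.take 9 := by
              rw [List.take_append]
              have : 9 - l.length = 0 := by omega
              simp [this]
            have hdrop : (l ++ '\n' :: r).drop 9 = l.drop 9 ++ '\n' :: r := by
              rw [List.drop_append]
              have : 9 - l.length = 0 := by omega
              simp [this]
            rw [chunk_some _ (by simp; omega)
                  (by rw [htake]; exact fun hm => hnl (List.take_subset 9 l hm)), hdrop]
            have : l.drop 9 ++ '\n' :: r ≠ [] := by simp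
            simp [pvMatch, this, splitNL_ne_nil]
  | succ g ih =>
      intro cs
      cases exists_decomp cs with
      | inl hno =>
          rw [splitNL_no_nl [] cs hno]
          by_cases hlen : 9 ≤ cs.length
          · rw [chunk_some cs hlen (fun hm => hno (List.take_subset 9 cs hm))]
            have hsw : PySem.Chars.startswith (cs.drop 9) ['\n'] = false :=
              startswith_nl_false_of_not_mem _ (fun hm => hno (List.drop_subset 9 cs hm))
            simp [pvMatch, hsw]
          · rw [chunk_none_of_short cs (by omega)]
            simp [pvMatch]
      | inr hdec =>
          obtain ⟨l, r, he, hnl⟩ := hdec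
          subst he
          rw [splitNL_append [] l r hnl]
          by_cases h9 : l.length < 9
          · have hmem : '\n' ∈ (l ++ '\n' :: r).take 9 := by
              rw [List.take_append]
              refine List.mem_append_right _ ?_
              cases h : 9 - l.length with
              | zero => omega
              | succ k => simp
            rw [chunk_none_of_nl _ hmem]
            have : l.length ≠ 9 := by omega
            simp [pvMatch, this]
          · have htake : (l ++ '\n' :: r).take 9 = l.take 9 := by
              rw [List.take_append]
              have : 9 - l.length = 0 := by omega
              simp [this]
            have hdrop : (l ++ '\n' :: r).drop 9 = l.drop 9 ++ '\n' :: r := by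
              rw [List.drop_append]
              have : 9 - l.length = 0 := by omega
              simp [this]
            rw [chunk_some _ (by simp; omega)
                  (by rw [htake]; exact fun hm => hnl (List.take_subset 9 l hm)), hdrop]
            by_cases heq : l.length = 9
            · have hd : l.drop 9 = [] := by rw [List.drop_eq_nil_iff]; omega
              rw [hd, List.nil_append]
              simp only [pvMatch, startswith_nl_cons, Bool.true_and]
              have hsl : PySem.List.slice ('\n' :: r) (some 1) none = r := by
                simp [pysem]
              rw [hsl, ih r, decide_eq_decide]
              simp only [List.nil_append, List.length_cons, List.mem_cons]
              constructor
              · rintro ⟨hc, hall⟩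
                refine ⟨by omega, ?_⟩
                rintro x (rfl | hx)
                · exact heq
                · exact hall x hx
              · rintro ⟨hc, hall⟩
                exact ⟨by omega, fun x hx => hall x (Or.inr hx)⟩
            · have hd : l.drop 9 ≠ [] := by rw [ne_eq, List.drop_eq_nil_iff]; omega
              obtain ⟨x, d, hx⟩ := List.exists_cons_of_ne_nil hd
              have hxl : x ∈ l := by
                have : x ∈ l.drop 9 := by rw [hx]; exact List.mem_cons_self
                exact List.drop_subset 9 l this
              have hxn : x ≠ '\n' := fun hh => hnl (hh ▸ hxl)
              rw [hx, List.cons_append]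
              simp [pvMatch, startswith_nl_false x _ hxn, heq]

theorem validate_txt_lines_spec : Claim_equal_validate_txt_lines := by
  intro txt _
  simp only [Spec_validate_txt_lines, validate_txt_lines, validate_txt_lines_alt,
    splitOn_eq_splitNL, foldl_res, pvMatch_eq 8 txt.toList]
  rw [Bool.eq_iff_iff]
  by_cases hc : (splitNL [] txt.toList).length = 9 <;>
    simp [hc, List.all_eq_true]
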